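-- pv_equiv track=rewrite | github.com/vrajeshsh/gfg-practice | Program to print reciprocal of letters - copy - GFG/program-to-print-reciprocal-of-letters-copy.py | reciprocalString
-- ===== SOURCE A (Python) =====
-- def reciprocalString(S):
--     # code here
--     new_str=""
--     for i in S:
--         if ord(i)>=ord("A") and ord(i)<=ord("Z"):
--             new_str+=chr((ord("A")+ord("Z"))-ord(i))
--         elif ord(i)>=ord("a") and ord(i)<=ord("z"):
--             new_str+=chr((ord("a")+ord("z"))-ord(i))
--         else:
--             new_str+=i
--     return new_str
-- ===== SOURCE B (Python) =====
-- def reciprocalString(S):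
--     # Build the 52-entry ordinal translation table once, then translate in one pass.
--     table = {}
--     for k in range(26):
--         table[ord('A') + k] = ord('Z') - k
--         table[ord('a') + k] = ord('z') - k
--     return S.translate(table)
-- ===== Notes on version B (the rewrite author's own statement) =====
-- stated objective: idiomatic
-- what changed: Replaced the per-character if/elif branch chain and string concatenation with a 52-entry ordinal translation table built once and applied via str.translate in a single pass.
import Mathlib
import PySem

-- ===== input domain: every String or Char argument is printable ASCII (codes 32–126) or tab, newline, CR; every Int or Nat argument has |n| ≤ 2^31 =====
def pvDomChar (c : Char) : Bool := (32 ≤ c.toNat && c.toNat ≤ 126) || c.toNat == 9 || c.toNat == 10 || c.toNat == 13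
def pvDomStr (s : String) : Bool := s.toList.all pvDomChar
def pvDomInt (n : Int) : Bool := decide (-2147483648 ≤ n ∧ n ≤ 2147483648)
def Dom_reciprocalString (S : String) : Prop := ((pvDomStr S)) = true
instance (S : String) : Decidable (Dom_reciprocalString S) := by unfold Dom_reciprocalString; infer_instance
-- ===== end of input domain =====

-- B replaces A's per-character branch chain by a 52-entry translation table built once and applied
-- in a single lookup pass (idiomatic str.translate); same return value on the whole domain.

set_option maxRecDepth 8192


-- ===== PORT A =====
-- literal port: walk the string, append the reciprocal letter (or the char itself) to the accumulator
def reciprocalString (S : String) : String :=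
  String.mk (S.toList.foldl
    (fun new_str i =>
      if 65 ≤ i.toNat ∧ i.toNat ≤ 90 then        -- ord('A') ≤ ord(i) ≤ ord('Z')
        new_str ++ [Char.ofNat ((65 + 90) - i.toNat)]
      else if 97 ≤ i.toNat ∧ i.toNat ≤ 122 then  -- ord('a') ≤ ord(i) ≤ ord('z')
        new_str ++ [Char.ofNat ((97 + 122) - i.toNat)]
      else
        new_str ++ [i])
    [])

-- ===== PORT B =====
-- the ordinal→ordinal translation table built once over range(26)
def pvTable_reciprocalString : PySem.Dict Int Int :=
  (PySem.List.pyRange 0 26 1).foldl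
    (fun table k => (table.insert (65 + k) (90 - k)).insert (97 + k) (122 - k))
    PySem.Dict.empty

-- S.translate(table): per char, look its ordinal up; mapped → chr of the value, unmapped → unchanged
def reciprocalString_alt (S : String) : String :=
  String.mk (S.toList.map (fun c =>
    match pvTable_reciprocalString.get? (Int.ofNat c.toNat) with
    | some n => Char.ofNat n.toNat
    | none => c))

-- ===== PRECONDITION & SPEC =====
def Spec_reciprocalString (S : String) (out : String) : Prop := out = reciprocalString_alt S
instance (S : String) (out : String) : Decidable (Spec_reciprocalString S out) := by unfold Spec_reciprocalString; infer_instance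

-- ===== CLAIM (what is proved, stated in full; the proofs are below) =====
def Claim_equal_reciprocalString : Prop := ∀ (S : String), Dom_reciprocalString S → Spec_reciprocalString S (reciprocalString S)

-- ===== LEMMAS AND PROOFS =====

-- A's per-character step and B's per-character step, named for the proofs
def pvStepA (i : Char) : Char :=
  if 65 ≤ i.toNat ∧ i.toNat ≤ 90 then Char.ofNat ((65 + 90) - i.toNat)
  else if 97 ≤ i.toNat ∧ i.toNat ≤ 122 then Char.ofNat ((97 + 122) - i.toNat)
  else i

def pvStepB (c : Char) : Char :=
  match pvTable_reciprocalString.get? (Int.ofNat c.toNat) with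
  | some n => Char.ofNat n.toNat
  | none => c

theorem pvStep_agree_code : ∀ n, n < 128 → pvStepA (Char.ofNat n) = pvStepB (Char.ofNat n) := by
  decide

theorem pvStep_agree (c : Char) (h : pvDomChar c = true) : pvStepA c = pvStepB c := by
  have hlt : c.toNat < 128 := by
    simp [pvDomChar] at h
    omega
  have := pvStep_agree_code c.toNat hlt
  rwa [Char.ofNat_toNat] at this

theorem pvFoldA_eq_map (l : List Char) (acc : List Char) (h : ∀ c ∈ l, pvDomChar c = true) :
    l.foldl
      (fun new_str i =>
        if 65 ≤ i.toNat ∧ i.toNat ≤ 90 then new_str ++ [Char.ofNat ((65 + 90) - i.toNat)]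
        else if 97 ≤ i.toNat ∧ i.toNat ≤ 122 then new_str ++ [Char.ofNat ((97 + 122) - i.toNat)]
        else new_str ++ [i])
      acc = acc ++ l.map pvStepB := by
  induction l generalizing acc with
  | nil => simp
  | cons c t ih =>
    have hc : pvDomChar c = true := h c (List.mem_cons_self ..)
    have hstep : pvStepA c = pvStepB c := pvStep_agree c hc
    simp only [List.foldl_cons, List.map_cons]
    rw [ih _ (fun x hx => h x (List.mem_cons_of_mem _ hx))]
    have : (if 65 ≤ c.toNat ∧ c.toNat ≤ 90 then acc ++ [Char.ofNat ((65 + 90) - c.toNat)]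
        else if 97 ≤ c.toNat ∧ c.toNat ≤ 122 then acc ++ [Char.ofNat ((97 + 122) - c.toNat)]
        else acc ++ [c]) = acc ++ [pvStepA c] := by
      unfold pvStepA; split_ifs <;> rfl
    rw [this, hstep]
    simp

-- ===== VERDICT (by name: the statement is the Claim_ definition above) =====
theorem reciprocalString_spec : Claim_equal_reciprocalString := by
  intro S hDom
  unfold Spec_reciprocalString reciprocalString reciprocalString_alt
  have h : ∀ c ∈ S.toList, pvDomChar c = true := by
    simpa [pvDomStr, List.all_eq_true, Dom_reciprocalString] using hDom
  rw [pvFoldA_eq_map S.toList [] h]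
  rfl
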